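-- pv_equiv track=rewrite | github.com/maj3r1819/practice-questions | max_number_array.py | sharvari
-- ===== SOURCE A (Python) =====
-- def sharvari(mylist):
--     newlist =[]
--     for i in range(len(mylist)):
--         num = mylist[i]
--         count,max_count = 0,0
--         while num!=0:
--             num = num//10
--             count+=1
--         max_count = max(max_count, count)
--         newlist.append(max_count)
--     index = newlist.index(max(newlist))
--
--     return mylist[index]
-- ===== SOURCE B (Python) =====
-- def sharvari(mylist):
--     m = max(mylist)
--     if m == 0:
--         return mylist[0]
--     t = 1
--     while t * 10 <= m:
--         t *= 10
--     for x in mylist: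
--         if x >= t:
--             return x
-- ===== Notes on version B (the rewrite author's own statement) =====
-- stated objective: alternative
-- what changed: B never counts digits per element: it takes the numeric max m, grows a power-of-ten threshold t with t*10 <= m, and returns the first element >= t (digit count is monotone on nonnegative ints, so the first element with >= t is exactly the first with the maximal digit count), replacing A's per-element digit loops plus newlist.index(max(newlist)) rescan.
import Mathlib
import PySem

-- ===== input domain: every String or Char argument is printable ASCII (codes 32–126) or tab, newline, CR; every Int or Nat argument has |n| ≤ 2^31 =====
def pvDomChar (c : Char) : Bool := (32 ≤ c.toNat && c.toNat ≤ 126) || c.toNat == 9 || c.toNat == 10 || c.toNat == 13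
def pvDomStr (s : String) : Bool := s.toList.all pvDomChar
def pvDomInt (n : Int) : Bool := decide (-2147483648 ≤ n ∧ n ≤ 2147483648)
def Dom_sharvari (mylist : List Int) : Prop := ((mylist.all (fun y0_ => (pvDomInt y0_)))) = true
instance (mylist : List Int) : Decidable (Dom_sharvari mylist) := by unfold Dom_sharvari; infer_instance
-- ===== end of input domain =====

-- B avoids per-element digit counting: it takes the numeric max m, grows a power-of-ten threshold t
-- while t*10 <= m, and returns the first element >= t (digit count is monotone on the nonnegative
-- ints of Pre_, so that is exactly A's first element with the most digits).

-- The Python while loop 'while num != 0: num //= 10; count += 1' terminates exactly for num ≥ 0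
-- (guaranteed by Pre_); on that domain Int floor-division by 10 agrees with Nat division, so A's
-- port counts digits through this Nat recursion (exact on the stated domain).
def digCount : Nat → Nat
  | 0 => 0
  | n + 1 => digCount ((n + 1) / 10) + 1
decreasing_by exact Nat.div_lt_self (Nat.succ_pos _) (by norm_num)

-- ===== PORT A =====
def sharvari (mylist : List Int) : Int :=
  -- for i in range(len(mylist)): … newlist.append(max(max_count, count))
  let newlist : List Int :=
    mylist.foldl (fun nl num => nl ++ [max 0 ((digCount num.toNat : Int))]) []
  match PySem.List.max? newlist (fun x => x) with
  | none => 0      -- max([]) raises ValueError: outside Pre_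
  | some m =>
    match PySem.List.index? newlist m with
    | none => 0    -- unreachable: m ∈ newlist
    | some idx => (PySem.List.pyGet? mylist (idx : Int)).getD 0

-- ===== PORT B =====
-- 't = 1; while t * 10 <= m: t *= 10'; the 't ≠ 0' conjunct is only a totality guard for Lean
-- (B always calls growT with t = 1, and t only grows)
def growT (m t : Nat) : Nat :=
  if h : t ≠ 0 ∧ t * 10 ≤ m then growT m (t * 10) else t
termination_by m - t
decreasing_by omega

def sharvari_alt (mylist : List Int) : Int :=
  match PySem.List.max? mylist (fun x => x) with
  | none => 0      -- max([]) raises ValueError: outside Pre_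
  | some m =>
    if m = 0 then (PySem.List.pyGet? mylist (0 : Int)).getD 0
    else
      -- for x in mylist: if x >= t: return x  (always found under Pre_: m itself is ≥ t)
      (mylist.find? (fun x => decide (((growT m.toNat 1 : Nat) : Int) ≤ x))).getD 0

-- ===== PRECONDITION & SPEC =====
-- Pre_ excludes the empty list, where A (and B) raise ValueError from max(), and lists containing a
-- negative element, where A's while loop never terminates (num // 10 stays -1 forever).
def Pre_sharvari (mylist : List Int) : Prop := mylist ≠ [] ∧ ∀ x ∈ mylist, 0 ≤ x
instance (mylist : List Int) : Decidable (Pre_sharvari mylist) := by unfold Pre_sharvari; infer_instance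

def pvWitness_sharvari : List Int := [3, 12, 0, 999, 45]

def Spec_sharvari (mylist : List Int) (out : Int) : Prop := out = sharvari_alt mylist
instance (mylist : List Int) (out : Int) : Decidable (Spec_sharvari mylist out) := by unfold Spec_sharvari; infer_instance

-- ===== CLAIM (what is proved, stated in full; the proofs are below) =====
def Claim_equal_sharvari : Prop := ∀ (mylist : List Int), Dom_sharvari mylist → Pre_sharvari mylist → Spec_sharvari mylist (sharvari mylist)

-- ===== LEMMAS AND PROOFS =====

def digitsB (x : Int) : Int := (digCount x.toNat : Int)

theorem digCount_of_pos (n : Nat) (h : 0 < n) : digCount n = digCount (n / 10) + 1 := by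
  cases n with
  | zero => omega
  | succ k => rw [digCount]

theorem digCount_zero : digCount 0 = 0 := by rw [digCount]

theorem digCount_mono : ∀ b a : Nat, a ≤ b → digCount a ≤ digCount b := by
  intro b
  induction b using Nat.strong_induction_on with
  | _ b ih =>
    intro a hab
    rcases Nat.eq_zero_or_pos a with ha | ha
    · simp [ha, digCount_zero]
    · have hb : 0 < b := lt_of_lt_of_le ha hab
      rw [digCount_of_pos a ha, digCount_of_pos b hb]
      have : digCount (a / 10) ≤ digCount (b / 10) :=
        ih (b / 10) (Nat.div_lt_self hb (by norm_num)) _ (Nat.div_le_div_right hab)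
      omega

theorem digCount_lt_pow : ∀ k x : Nat, x < 10 ^ k → digCount x ≤ k := by
  intro k
  induction k with
  | zero => intro x hx; interval_cases x; simp [digCount_zero]
  | succ k ih =>
    intro x hx
    rcases Nat.eq_zero_or_pos x with hx0 | hx0
    · simp [hx0, digCount_zero]
    · rw [digCount_of_pos x hx0]
      have : x / 10 < 10 ^ k := by
        rw [Nat.div_lt_iff_lt_mul (by norm_num)]
        calc x < 10 ^ (k + 1) := hx
        _ = 10 ^ k * 10 := by ring
      have := ih _ this
      omega

theorem digCount_pow (k : Nat) : digCount (10 ^ k) = k + 1 := by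
  induction k with
  | zero => rw [pow_zero, digCount_of_pos 1 one_pos]; norm_num [digCount_zero]
  | succ k ih =>
    rw [digCount_of_pos _ (Nat.pow_pos (by norm_num))]
    have h10 : 10 ^ (k + 1) / 10 = 10 ^ k := by
      rw [pow_succ, Nat.mul_div_cancel _ (by norm_num)]
    rw [h10, ih]

theorem growT_spec (m : Nat) : ∀ t : Nat, 0 < t → t ≤ m →
    (∃ j, growT m t = t * 10 ^ j) ∧ growT m t ≤ m ∧ m < growT m t * 10 := by
  intro t
  induction t using growT.induct m with
  | case1 t h ih =>
    intro ht htm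
    rw [growT, dif_pos h]
    obtain ⟨⟨j, hj⟩, h2, h3⟩ := ih (by omega) h.2
    exact ⟨⟨j + 1, by rw [hj]; ring⟩, h2, h3⟩
  | case2 t h =>
    intro ht htm
    rw [growT, dif_neg h]
    refine ⟨⟨0, by ring⟩, htm, ?_⟩
    by_cases h10 : t * 10 ≤ m
    · exact absurd ⟨by omega, h10⟩ h
    · omega

theorem digitsB_mono {a b : Int} (hab : a ≤ b) : digitsB a ≤ digitsB b := by
  unfold digitsB
  exact_mod_cast digCount_mono b.toNat a.toNat (Int.toNat_le_toNat hab)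

theorem digitsB_max (a x : Int) : digitsB (max a x) = max (digitsB a) (digitsB x) := by
  rcases le_total a x with h | h
  · rw [max_eq_right h, max_eq_right (digitsB_mono h)]
  · rw [max_eq_left h, max_eq_left (digitsB_mono h)]

-- the running max of the digit counts is the digit count of the running numeric max
theorem foldl_digits_comm : ∀ (xs : List Int) (a : Int),
    (xs.map digitsB).foldl max (digitsB a) = digitsB (xs.foldl max a) := by
  intro xs
  induction xs with
  | nil => intro a; rfl
  | cons x t ih =>
    intro a
    simp only [List.map_cons, List.foldl_cons]
    rw [← digitsB_max, ih]

-- the first index of value M in the mapped list addresses the first element x with digitsB x = M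
theorem find_map_index : ∀ (l : List Int) (M : Int), (∃ x ∈ l, digitsB x = M) →
    ∃ i z, PySem.List.index? (l.map digitsB) M = some i ∧
      l.find? (fun x => digitsB x == M) = some z ∧ l[i]? = some z := by
  intro l
  induction l with
  | nil => rintro M ⟨x, hx, _⟩; simp at hx
  | cons a t ih =>
    intro M hex
    by_cases ha : digitsB a = M
    · refine ⟨0, a, ?_, ?_, rfl⟩
      · rw [List.map_cons, ha]; exact PySem.List.index?_cons_self _ _
      · simp [ha]
    · obtain ⟨x, hx, hxM⟩ := hex
      rcases List.mem_cons.mp hx with rfl | hxt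
      · exact absurd hxM ha
      · obtain ⟨i, z, hidx, hfind, hget⟩ := ih M ⟨x, hxt, hxM⟩
        refine ⟨i + 1, z, ?_, ?_, ?_⟩
        · rw [List.map_cons, PySem.List.index?_cons_of_ne _ ha, hidx]; rfl
        · simp [ha, hfind]
        · simpa using hget

theorem find?_congr_mem {α : Type} (l : List α) (p q : α → Bool)
    (h : ∀ x ∈ l, p x = q x) : l.find? p = l.find? q := by
  induction l with
  | nil => rfl
  | cons a t ih =>
    simp only [List.find?_cons, h a (List.mem_cons_self)]
    cases q a
    · exact ih (fun x hx => h x (List.mem_cons_of_mem _ hx))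
    · rfl

theorem sharvari_eq (a : Int) (xs : List Int) (hpos : ∀ x ∈ a :: xs, 0 ≤ x) :
    sharvari (a :: xs) = sharvari_alt (a :: xs) := by
  -- A's newlist is the mapped digit counts
  have hmap : (a :: xs).foldl (fun nl num => nl ++ [max 0 ((digCount num.toNat : Int))]) []
      = (a :: xs).map digitsB := by
    rw [PySem.List.foldl_append_singleton_eq_map]
    apply List.map_congr_left
    intro x _
    simp [digitsB]
  set m : Int := xs.foldl max a with hm
  have hmmax := PySem.List.le_foldl_max xs a
  have hm_mem : m ∈ a :: xs := by
    rcases PySem.List.foldl_max_mem xs a with h | h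
    · rw [hm, h]; exact List.mem_cons_self
    · exact List.mem_cons_of_mem _ (hm ▸ h)
  have hle : ∀ x ∈ a :: xs, x ≤ m := by
    intro x hx
    rcases List.mem_cons.mp hx with rfl | hxt
    · exact hmmax.1
    · exact hmmax.2 x hxt
  -- A = first element whose digit count is digitsB m
  have hD : (List.map digitsB xs).foldl max (digitsB a) = digitsB m := foldl_digits_comm xs a
  obtain ⟨i, z, hidx, hfind, hget⟩ :=
    find_map_index (a :: xs) (digitsB m) ⟨m, hm_mem, rfl⟩
  have hA : sharvari (a :: xs) = z := by
    unfold sharvari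
    simp only [hmap, List.map_cons]
    rw [PySem.List.max?_id_cons]
    show (match PySem.List.index? (digitsB a :: xs.map digitsB)
          ((xs.map digitsB).foldl max (digitsB a)) with
        | none => (0 : Int)
        | some idx => (PySem.List.pyGet? (a :: xs) (idx : Int)).getD 0) = z
    rw [hD]
    simp only [List.map_cons] at hidx
    rw [hidx]
    show (PySem.List.pyGet? (a :: xs) (i : Int)).getD 0 = z
    rw [PySem.List.pyGet?_natCast, hget]
    rfl
  rw [hA]
  -- now compute B
  have hB : sharvari_alt (a :: xs)
      = if m = 0 then (PySem.List.pyGet? (a :: xs) (0 : Int)).getD 0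
        else ((a :: xs).find? (fun x => decide (((growT m.toNat 1 : Nat) : Int) ≤ x))).getD 0 := by
    unfold sharvari_alt
    rw [PySem.List.max?_id_cons]
  rw [hB]
  by_cases hmz : m = 0
  · -- all elements are 0; both sides return the head
    rw [if_pos hmz]
    have haz : a = 0 := le_antisymm (by simpa [hmz] using hle a List.mem_cons_self)
      (hpos a List.mem_cons_self)
    have hhead : (a :: xs).find? (fun x => digitsB x == digitsB m) = some a := by
      simp [haz, hmz]
    rw [hhead] at hfind
    have hget0 : PySem.List.pyGet? (a :: xs) (0 : Int) = some a := by simp [pysem]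
    rw [hget0, Option.some.inj hfind]
    rfl
  · rw [if_neg hmz]
    have hm0 : 0 ≤ m := hpos m hm_mem
    have hm1 : 1 ≤ m.toNat := by omega
    obtain ⟨⟨j, hj⟩, ht_le, ht_gt⟩ := growT_spec m.toNat 1 one_pos hm1
    set tN : Nat := growT m.toNat 1 with htN
    rw [one_mul] at hj
    -- digCount m.toNat = j + 1
    have hdm : digCount m.toNat = j + 1 := by
      have h1 : j + 1 ≤ digCount m.toNat := by
        have := digCount_mono m.toNat (10 ^ j) (hj ▸ ht_le)
        rwa [digCount_pow] at this
      have h2 : digCount m.toNat ≤ j + 1 := by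
        apply digCount_lt_pow
        calc m.toNat < tN * 10 := ht_gt
        _ = 10 ^ (j + 1) := by rw [hj]; ring
      omega
    -- the two selection predicates agree on every list element
    have hpred : ∀ x ∈ a :: xs, (digitsB x == digitsB m) = decide ((tN : Int) ≤ x) := by
      intro x hx
      have hx0 : 0 ≤ x := hpos x hx
      have hxm : x ≤ m := hle x hx
      by_cases hcase : (tN : Int) ≤ x
      · have h1 : tN ≤ x.toNat := by omega
        have h2 : x.toNat ≤ m.toNat := by omega
        have hge : j + 1 ≤ digCount x.toNat := by
          have := digCount_mono x.toNat (10 ^ j) (hj ▸ h1)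
          rwa [digCount_pow] at this
        have hlt : digCount x.toNat ≤ j + 1 := hdm ▸ digCount_mono m.toNat x.toNat h2
        have heq : digitsB x = digitsB m := by
          unfold digitsB; rw [hdm]; exact_mod_cast (by omega : digCount x.toNat = j + 1)
        simp [heq, hcase]
      · have h1 : x.toNat < tN := by omega
        have hbound : digCount x.toNat ≤ j := digCount_lt_pow j x.toNat (by omega)
        have hne : digitsB x ≠ digitsB m := by
          unfold digitsB; rw [hdm]
          intro hc
          have : digCount x.toNat = j + 1 := by exact_mod_cast hc
          omega
        simp [hne, hcase]
    rw [← find?_congr_mem (a :: xs) _ _ hpred, hfind]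
    rfl

-- ===== VERDICT (by name: the statement is the Claim_ definition above) =====
theorem sharvari_spec : Claim_equal_sharvari := by
  intro mylist _ hpre
  cases mylist with
  | nil => exact absurd rfl hpre.1
  | cons a xs => exact sharvari_eq a xs hpre.2
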